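-- pv_equiv track=rewrite | github.com/alejjuuu/Code-work | Python/NJIT/HW10/HW10_LuisVelasquez3.py | shareOneLetter
-- ===== SOURCE A (Python) =====
-- def shareOneLetter(wordList):
--     lst ={}                         #empty list
--     for word in wordList:               #first for loop
--         if word not in lst:             #if the first word is not in the empty list then skip it otherwise create a new key
--             lst[word] = []
--         for each_w in wordList:         # a neasted for loop
--             valid = 0                   # if the condition is true it will add up a one to the variable
--             for eachCh in each_w:       # for loop that takes each word and goes to each character
--                 if (eachCh in word):        # if any character is in the initial word
--                     valid = 1                 # valid becomes 1
--             if (each_w not in lst[word]) and (valid==1):    # if the word is not repeated and valid is == 1 then append it to the value of the key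
--                 lst[word].append(each_w)
--     return lst
-- ===== SOURCE B (Python) =====
-- def shareOneLetter(wordList):
--     # Inverted index: for each character, the set of words containing it.
--     index = {}
--     for w in wordList:
--         for ch in w:
--             index.setdefault(ch, set()).add(w)
--     result = {}
--     for word in wordList:
--         if word in result:
--             continue
--         cand = set()
--         for ch in word:
--             cand |= index.get(ch, set())
--         seen = set()
--         vals = []
--         for w in wordList:
--             if w in cand and w not in seen:
--                 seen.add(w)
--                 vals.append(w)
--         result[word] = vals
--     return result
-- ===== Notes on version B (the rewrite author's own statement) =====
-- stated objective: faster
-- what changed: Replaces A's per-pair character scan (for every key word, rescan every other word's characters) by a one-pass inverted index char->set-of-words; each key's candidates are the union of its characters' posting sets, and one ordered walk over wordList rebuilds A's value lists with A's order and dedup.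
import Mathlib
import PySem

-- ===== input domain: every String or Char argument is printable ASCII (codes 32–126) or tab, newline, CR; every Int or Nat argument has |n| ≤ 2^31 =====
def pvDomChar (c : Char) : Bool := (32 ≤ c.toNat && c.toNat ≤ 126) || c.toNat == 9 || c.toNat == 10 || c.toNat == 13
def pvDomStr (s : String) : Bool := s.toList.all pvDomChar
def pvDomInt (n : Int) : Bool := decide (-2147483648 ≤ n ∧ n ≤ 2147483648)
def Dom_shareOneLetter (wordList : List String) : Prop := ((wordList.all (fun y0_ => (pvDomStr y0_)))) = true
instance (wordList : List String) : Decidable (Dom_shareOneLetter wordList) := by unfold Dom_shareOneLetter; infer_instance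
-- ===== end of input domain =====

-- B replaces A's nested per-pair character scans by an inverted index (char → set of words containing it);
-- each key's candidate set is the union of its characters' posting sets, and one ordered walk over
-- wordList reproduces A's value order and dedup exactly. Objective: faster (measured).

-- ===== PORT A =====
def pvAValid (word each_w : String) : Int :=
  each_w.toList.foldl (fun v eachCh => if word.toList.contains eachCh then 1 else v) 0

def pvAInner (word : String) (lst : PySem.Dict String (List String)) (each_w : String) :
    PySem.Dict String (List String) :=
  if ((lst.getD word []).contains each_w) = false ∧ pvAValid word each_w = 1 then
    lst.insert word ((lst.getD word []) ++ [each_w])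
  else lst

def pvAOuter (wordList : List String) (lst : PySem.Dict String (List String)) (word : String) :
    PySem.Dict String (List String) :=
  let lst := if lst.contains word = false then lst.insert word [] else lst
  wordList.foldl (pvAInner word) lst

def shareOneLetter (wordList : List String) : List (String × List String) :=
  (wordList.foldl (pvAOuter wordList) PySem.Dict.empty).items

-- ===== PORT B =====
def pvBIndexWord (d : PySem.Dict Char (PySem.Set String)) (w : String) :
    PySem.Dict Char (PySem.Set String) :=
  w.toList.foldl (fun d ch => d.insert ch (PySem.Set.add (d.getD ch PySem.Set.empty) w)) d

def pvBIndex (wordList : List String) : PySem.Dict Char (PySem.Set String) :=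
  wordList.foldl pvBIndexWord PySem.Dict.empty

def pvBCand (index : PySem.Dict Char (PySem.Set String)) (word : String) : PySem.Set String :=
  word.toList.foldl (fun s ch => PySem.Set.union s (index.getD ch PySem.Set.empty)) PySem.Set.empty

def pvBVals (cand : PySem.Set String) (wordList : List String) : List String :=
  (wordList.foldl
    (fun (p : PySem.Set String × List String) w =>
      if PySem.Set.contains cand w = true ∧ PySem.Set.contains p.1 w = false then
        (PySem.Set.add p.1 w, p.2 ++ [w])
      else p)
    (PySem.Set.empty, [])).2

def pvBOuter (wordList : List String) (index : PySem.Dict Char (PySem.Set String))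
    (result : PySem.Dict String (List String)) (word : String) :
    PySem.Dict String (List String) :=
  if result.contains word then result
  else result.insert word (pvBVals (pvBCand index word) wordList)

def shareOneLetter_alt (wordList : List String) : List (String × List String) :=
  (wordList.foldl (pvBOuter wordList (pvBIndex wordList)) PySem.Dict.empty).items

-- ===== PRECONDITION & SPEC =====
def Spec_shareOneLetter (wordList : List String) (out : List (String × List String)) : Prop := out = shareOneLetter_alt wordList
instance (wordList : List String) (out : List (String × List String)) : Decidable (Spec_shareOneLetter wordList out) := by unfold Spec_shareOneLetter; infer_instance

-- ===== CLAIM (what is proved, stated in full; the proofs are below) =====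
def Claim_equal_shareOneLetter : Prop := ∀ (wordList : List String), Dom_shareOneLetter wordList → Spec_shareOneLetter wordList (shareOneLetter wordList)

-- ===== LEMMAS AND PROOFS =====

-- 'w shares at least one character with word'
def sharesB (word w : String) : Bool := w.toList.any (fun c => word.toList.contains c)

def Fv (wordList : List String) (word : String) : List String :=
  PySem.Set.ofList (wordList.filter (fun w => sharesB word w))

def Ref (wordList : List String) : List (String × List String) :=
  (PySem.Set.ofList wordList).map (fun w => (w, Fv wordList w))

lemma validAux (p : Char → Bool) : ∀ (cs : List Char) (v : Int),
    cs.foldl (fun v c => if p c then 1 else v) v = if cs.any p then 1 else v := by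
  intro cs
  induction cs with
  | nil => simp
  | cons c cs ih =>
    intro v
    simp only [List.foldl_cons, List.any_cons, ih]
    by_cases h : p c <;> simp [h]

lemma validEq (word w : String) : pvAValid word w = if sharesB word w then 1 else 0 := by
  unfold pvAValid sharesB
  rw [validAux (fun c => word.toList.contains c) w.toList 0]

lemma foldAddFilter (p : String → Bool) : ∀ (xs : List String) (L : PySem.Set String),
    xs.foldl (fun acc w => if (acc.contains w) = false ∧ p w then acc ++ [w] else acc) L
      = (xs.filter p).foldl PySem.Set.add L := by
  intro xs
  induction xs with
  | nil => simp
  | cons x xs ih =>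
    intro L
    rw [List.foldl_cons, List.filter_cons]
    by_cases hp : p x
    · by_cases hc : x ∈ L
      · have hcc : L.contains x = true := by simpa using hc
        rw [if_neg (fun h => absurd hc (by simpa using h.1)), if_pos hp, List.foldl_cons, PySem.Set.add_of_mem hc, ih]
      · have hcc : L.contains x = false := by simpa using hc
        rw [if_pos ⟨hcc, hp⟩, if_pos hp, List.foldl_cons, PySem.Set.add_of_not_mem hc, ih]
    · rw [if_neg (by simp [hp]), if_neg hp, ih]

lemma innerA_build (word : String) : ∀ (xs : List String)
    (d : PySem.Dict String (List String)) (L : List String),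
    xs.foldl (pvAInner word) (d.insert word L)
      = d.insert word
          (xs.foldl (fun acc w => if (acc.contains w) = false ∧ sharesB word w then acc ++ [w] else acc) L) := by
  intro xs
  induction xs with
  | nil => intro d L; rfl
  | cons w xs ih =>
    intro d L
    rw [List.foldl_cons, List.foldl_cons]
    have hg : (d.insert word L).getD word [] = L := PySem.Dict.getD_insert_self d word L []
    by_cases hs : sharesB word w
    · by_cases hm : w ∈ L
      · have : pvAInner word (d.insert word L) w = d.insert word L := by
          simp [pvAInner, hg, hm]
        rw [this, if_neg (fun h => absurd hm (by simpa using h.1)), ih]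
      · have : pvAInner word (d.insert word L) w = d.insert word (L ++ [w]) := by
          simp [pvAInner, hg, hm, validEq, hs, PySem.Dict.insert_insert_self]
        rw [this, if_pos ⟨by simpa using hm, hs⟩, ih]
    · have : pvAInner word (d.insert word L) w = d.insert word L := by
        simp [pvAInner, validEq, hs]
      rw [this, if_neg (by simp [hs]), ih]

lemma innerA_noop (word : String) : ∀ (xs : List String)
    (d : PySem.Dict String (List String)) (L : List String),
    d.getD word [] = L →
    (∀ w ∈ xs, sharesB word w = true → L.contains w = true) →
    xs.foldl (pvAInner word) d = d := by
  intro xs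
  induction xs with
  | nil => intros; rfl
  | cons w xs ih =>
    intro d L h hall
    rw [List.foldl_cons]
    have hstep : pvAInner word d w = d := by
      by_cases hs : sharesB word w
      · have hm : w ∈ L := by simpa using hall w (by simp) hs
        simp [pvAInner, h, hm]
      · simp [pvAInner, validEq, hs]
    rw [hstep]
    exact ih d L h (fun w hw => hall w (by simp [hw]))

lemma FvMem (wordList : List String) (word w : String) :
    w ∈ Fv wordList word ↔ (w ∈ wordList ∧ sharesB word w = true) := by
  simp [Fv, PySem.Set.mem_ofList]

lemma keys_of_items (d : PySem.Dict String (List String)) (p : List String)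
    (f : String → List String)
    (h : d.items = p.map (fun w => (w, f w))) : d.keys = p := by
  simp only [PySem.Dict.keys, h, List.map_map]
  exact List.map_id'' (congrFun rfl) p

lemma outerA_inv (wordList : List String) :
    ∀ (xs p : List String) (d : PySem.Dict String (List String)),
      d.items = (PySem.Set.ofList p).map (fun w => (w, Fv wordList w)) →
      (xs.foldl (pvAOuter wordList) d).items
        = (PySem.Set.update (PySem.Set.ofList p) xs).map (fun w => (w, Fv wordList w)) := by
  intro xs
  induction xs with
  | nil => intro p d h; rw [List.foldl_nil, PySem.Set.update_nil]; exact h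
  | cons word xs ih =>
    intro p d h
    have hkeys : d.keys = PySem.Set.ofList p := keys_of_items d _ _ h
    have hnd : d.keys.Nodup := by rw [hkeys]; exact PySem.Set.nodup_ofList p
    rw [List.foldl_cons, PySem.Set.update_cons]
    by_cases hm : word ∈ (PySem.Set.ofList p)
    · have hcont : d.contains word = true := by
        rw [PySem.Dict.contains_eq_decide_mem_keys, hkeys]; simpa using hm
      have hget : d.getD word [] = Fv wordList word := by
        apply PySem.Dict.getD_of_mem_items _ _ hnd
        rw [h]; exact List.mem_map_of_mem hm
      have hstep : pvAOuter wordList d word = d := by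
        unfold pvAOuter
        rw [hcont]
        simp only [Bool.true_eq_false, if_false]
        exact innerA_noop word wordList d (Fv wordList word) hget
          (fun w hw hs => by simpa using (FvMem wordList word w).mpr ⟨hw, hs⟩)
      rw [hstep, PySem.Set.add_of_mem hm]
      exact ih p d h
    · have hcont : d.contains word = false := by
        rw [PySem.Dict.contains_eq_decide_mem_keys, hkeys]; simpa using hm
      have hstep : pvAOuter wordList d word = d.insert word (Fv wordList word) := by
        unfold pvAOuter
        rw [hcont, if_pos rfl]
        rw [innerA_build, foldAddFilter]
        rfl
      rw [hstep]
      have hitems : (d.insert word (Fv wordList word)).items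
          = (PySem.Set.add (PySem.Set.ofList p) word).map (fun w => (w, Fv wordList w)) := by
        rw [PySem.Dict.items_insert_of_not_contains d _ hcont, h,
          PySem.Set.add_of_not_mem hm, List.map_append]
        rfl
      have := ih (p ++ [word]) (d.insert word (Fv wordList word))
        (by rwa [PySem.Set.ofList_append_singleton])
      rwa [PySem.Set.ofList_append_singleton] at this

lemma A_eq_Ref (wordList : List String) : shareOneLetter wordList = Ref wordList := by
  unfold shareOneLetter Ref
  have := outerA_inv wordList wordList [] PySem.Dict.empty (by rfl)
  simpa [PySem.Set.update_nil_left] using this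

lemma indexWordMem (w w' : String) (c : Char) :
    ∀ (chs : List Char) (d : PySem.Dict Char (PySem.Set String)),
      (w' ∈ (chs.foldl (fun d ch => d.insert ch (PySem.Set.add (d.getD ch PySem.Set.empty) w)) d).getD c PySem.Set.empty)
        ↔ (w' ∈ d.getD c PySem.Set.empty ∨ (w' = w ∧ c ∈ chs)) := by
  intro chs
  induction chs with
  | nil => simp
  | cons ch chs ih =>
    intro d
    rw [List.foldl_cons, ih]
    rw [PySem.Dict.getD_insert]
    by_cases hc : c = ch
    · subst hc
      simp [PySem.Set.mem_add]
      tauto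
    · simp [hc]

lemma indexMem (wordList : List String) (c : Char) (w' : String) :
    ∀ (d : PySem.Dict Char (PySem.Set String)),
    w' ∈ (wordList.foldl pvBIndexWord d).getD c PySem.Set.empty
      ↔ (w' ∈ d.getD c PySem.Set.empty ∨ (w' ∈ wordList ∧ c ∈ w'.toList)) := by
  induction wordList with
  | nil => simp
  | cons w ws ih =>
    intro d
    rw [List.foldl_cons, ih, pvBIndexWord, indexWordMem]
    constructor
    · rintro (⟨h | ⟨rfl, hc⟩⟩ | ⟨hm, hc⟩)
      · exact Or.inl h
      · exact Or.inr ⟨by simp, hc⟩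
      · exact Or.inr ⟨by simp [hm], hc⟩
    · rintro (h | ⟨hm, hc⟩)
      · exact Or.inl (Or.inl h)
      · rcases List.mem_cons.mp hm with rfl | hm
        · exact Or.inl (Or.inr ⟨rfl, hc⟩)
        · exact Or.inr ⟨hm, hc⟩

lemma candAux (index : PySem.Dict Char (PySem.Set String)) (w' : String) :
    ∀ (chs : List Char) (s : PySem.Set String),
      w' ∈ chs.foldl (fun s ch => PySem.Set.union s (index.getD ch PySem.Set.empty)) s
        ↔ (w' ∈ s ∨ ∃ ch ∈ chs, w' ∈ index.getD ch PySem.Set.empty) := by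
  intro chs
  induction chs with
  | nil => simp
  | cons ch chs ih =>
    intro s
    rw [List.foldl_cons, ih]
    rw [PySem.Set.mem_union]
    simp only [List.mem_cons]
    constructor
    · rintro (⟨h | h⟩ | ⟨c, hc, h⟩)
      · exact Or.inl h
      · exact Or.inr ⟨ch, Or.inl rfl, h⟩
      · exact Or.inr ⟨c, Or.inr hc, h⟩
    · rintro (h | ⟨c, rfl | hc, h⟩)
      · exact Or.inl (Or.inl h)
      · exact Or.inl (Or.inr h)
      · exact Or.inr ⟨c, hc, h⟩

lemma candMem (wordList : List String) (word w' : String) :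
    w' ∈ pvBCand (pvBIndex wordList) word ↔ (w' ∈ wordList ∧ sharesB word w' = true) := by
  rw [pvBCand, candAux]
  simp only [pvBIndex]
  constructor
  · rintro (h | ⟨ch, hch, h⟩)
    · simp [PySem.Set.empty] at h
    · rcases (indexMem wordList ch w' PySem.Dict.empty).mp h with h | ⟨hm, hc⟩
      · simp [PySem.Set.empty] at h
      · refine ⟨hm, ?_⟩
        simp only [sharesB, List.any_eq_true]
        exact ⟨ch, hc, by simpa using hch⟩
  · rintro ⟨hm, hs⟩
    simp only [sharesB, List.any_eq_true] at hs
    obtain ⟨ch, hc, hw⟩ := hs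
    exact Or.inr ⟨ch, by simpa using hw, (indexMem wordList ch w' PySem.Dict.empty).mpr (Or.inr ⟨hm, hc⟩)⟩

lemma pairDiag (cand : PySem.Set String) :
    ∀ (xs : List String) (o : PySem.Set String),
      xs.foldl
        (fun (p : PySem.Set String × List String) w =>
          if PySem.Set.contains cand w = true ∧ PySem.Set.contains p.1 w = false then
            (PySem.Set.add p.1 w, p.2 ++ [w])
          else p) (o, o)
      = (xs.foldl (fun acc w => if (acc.contains w) = false ∧ PySem.Set.contains cand w then acc ++ [w] else acc) o,
         xs.foldl (fun acc w => if (acc.contains w) = false ∧ PySem.Set.contains cand w then acc ++ [w] else acc) o) := by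
  intro xs
  induction xs with
  | nil => intro o; rfl
  | cons w xs ih =>
    intro o
    rw [List.foldl_cons, List.foldl_cons]
    dsimp only
    by_cases hcw : PySem.Set.contains cand w
    · by_cases hc : o.contains w
      · rw [if_neg (by simp_all), if_neg (by simp_all)]
        exact ih o
      · have hmem : w ∉ o := by simpa using hc
        rw [if_pos ⟨hcw, by simpa using hc⟩, if_pos ⟨by simpa using hc, hcw⟩]
        have : PySem.Set.add o w = o ++ [w] := PySem.Set.add_of_not_mem hmem
        rw [this]
        exact ih (o ++ [w])
    · rw [if_neg (by simp_all), if_neg (by simp_all)]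
      exact ih o

lemma valsEq (wordList : List String) (word : String) :
    pvBVals (pvBCand (pvBIndex wordList) word) wordList = Fv wordList word := by
  have hstart : pvBVals (pvBCand (pvBIndex wordList) word) wordList
      = (wordList.foldl
          (fun (p : PySem.Set String × List String) w =>
            if PySem.Set.contains (pvBCand (pvBIndex wordList) word) w = true ∧ PySem.Set.contains p.1 w = false then
              (PySem.Set.add p.1 w, p.2 ++ [w])
            else p) (PySem.Set.empty, PySem.Set.empty)).2 := rfl
  rw [hstart, pairDiag]
  dsimp only
  rw [foldAddFilter (fun w => PySem.Set.contains (pvBCand (pvBIndex wordList) word) w) wordList PySem.Set.empty]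
  have hemp : (PySem.Set.empty : PySem.Set String) = [] := rfl
  rw [hemp, ← PySem.Set.ofList_eq_foldl]
  unfold Fv
  congr 1
  apply List.filter_congr
  intro w hw
  have hiff := candMem wordList word w
  by_cases hmem : w ∈ pvBCand (pvBIndex wordList) word
  · have h1 : PySem.Set.contains (pvBCand (pvBIndex wordList) word) w = true := by simpa using hmem
    rw [h1, (hiff.mp hmem).2]
  · have h1 : PySem.Set.contains (pvBCand (pvBIndex wordList) word) w = false := by simpa using hmem
    have h2 : sharesB word w = false := by
      cases hs2 : sharesB word w
      · rfl
      · exact absurd (hiff.mpr ⟨hw, hs2⟩) hmem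
    rw [h1, h2]

lemma outerB_inv (wordList : List String) :
    ∀ (xs p : List String) (d : PySem.Dict String (List String)),
      d.items = (PySem.Set.ofList p).map (fun w => (w, Fv wordList w)) →
      (xs.foldl (pvBOuter wordList (pvBIndex wordList)) d).items
        = (PySem.Set.update (PySem.Set.ofList p) xs).map (fun w => (w, Fv wordList w)) := by
  intro xs
  induction xs with
  | nil => intro p d h; rw [List.foldl_nil, PySem.Set.update_nil]; exact h
  | cons word xs ih =>
    intro p d h
    have hkeys : d.keys = PySem.Set.ofList p := keys_of_items d _ _ h
    rw [List.foldl_cons, PySem.Set.update_cons]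
    by_cases hm : word ∈ (PySem.Set.ofList p)
    · have hcont : d.contains word = true := by
        rw [PySem.Dict.contains_eq_decide_mem_keys, hkeys]; simpa using hm
      have hstep : pvBOuter wordList (pvBIndex wordList) d word = d := by
        unfold pvBOuter; rw [hcont, if_pos rfl]
      rw [hstep, PySem.Set.add_of_mem hm]
      exact ih p d h
    · have hcont : d.contains word = false := by
        rw [PySem.Dict.contains_eq_decide_mem_keys, hkeys]; simpa using hm
      have hstep : pvBOuter wordList (pvBIndex wordList) d word
          = d.insert word (Fv wordList word) := by
        unfold pvBOuter; rw [hcont, valsEq]; simp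
      rw [hstep]
      have := ih (p ++ [word]) (d.insert word (Fv wordList word))
        (by rw [PySem.Dict.items_insert_of_not_contains d _ hcont, h,
              PySem.Set.ofList_append_singleton, PySem.Set.add_of_not_mem hm, List.map_append]
            rfl)
      rwa [PySem.Set.ofList_append_singleton] at this

lemma B_eq_Ref (wordList : List String) : shareOneLetter_alt wordList = Ref wordList := by
  unfold shareOneLetter_alt Ref
  have := outerB_inv wordList wordList [] PySem.Dict.empty (by rfl)
  simpa [PySem.Set.update_nil_left] using this

-- ===== VERDICT (by name: the statement is the Claim_ definition above) =====
theorem shareOneLetter_spec : Claim_equal_shareOneLetter := by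
  intro wordList _
  unfold Spec_shareOneLetter
  rw [A_eq_Ref, B_eq_Ref]
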